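-- pv_equiv track=rewrite | github.com/Shujun-He/Ribonanza2_Genome_Scan | Scoring.py | get_helices
-- ===== SOURCE A (Python) =====
-- def get_helices(bp_list, allowed_buldge_len=0):
--     #bp_list = convert_dotbracket_to_bp_list(s, allow_pseudoknots=True)
--     bp_list = bp_list[:]
--     helices = []
--     current_helix = []
--     while bp_list != []:
--         current_bp = bp_list.pop(0)
--         if current_helix == []:
--             current_helix.append(current_bp)
--         else:
--             in_helix_left = list(range(current_helix[-1][0] + 1, current_helix[-1][0] + allowed_buldge_len + 2))
--             in_helix_right = list(range(current_helix[-1][1] - allowed_buldge_len - 1, current_helix[-1][1]))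
--             if current_bp[0] in in_helix_left and current_bp[1] in in_helix_right:
--                 current_helix.append(current_bp)
--             else:
--                 helices.append(current_helix)
--                 current_helix = [current_bp]
--     helices.append(current_helix)
--     return helices
-- ===== SOURCE B (Python) =====
-- def get_helices(bp_list, allowed_buldge_len=0):
--     # Staged: pass 1 marks cut positions between non-contiguous neighbours,
--     # pass 2 slices the list at those positions.
--     k = allowed_buldge_len
--     cuts = [i + 1 for i, (p, q) in enumerate(zip(bp_list, bp_list[1:]))
--             if not (p[0] < q[0] <= p[0] + k + 1 and p[1] - k - 1 <= q[1] < p[1])]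
--     bounds = [0] + cuts + [len(bp_list)]
--     return [bp_list[a:b] for a, b in zip(bounds, bounds[1:])]
-- ===== Notes on version B (the rewrite author's own statement) =====
-- stated objective: faster
-- what changed: Two staged passes instead of A's destructive pop(0) loop with range-list membership: first compute the list of cut indices between non-contiguous neighbours by one arithmetic scan over adjacent pairs, then slice the input at those cut indices.
import Mathlib
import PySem

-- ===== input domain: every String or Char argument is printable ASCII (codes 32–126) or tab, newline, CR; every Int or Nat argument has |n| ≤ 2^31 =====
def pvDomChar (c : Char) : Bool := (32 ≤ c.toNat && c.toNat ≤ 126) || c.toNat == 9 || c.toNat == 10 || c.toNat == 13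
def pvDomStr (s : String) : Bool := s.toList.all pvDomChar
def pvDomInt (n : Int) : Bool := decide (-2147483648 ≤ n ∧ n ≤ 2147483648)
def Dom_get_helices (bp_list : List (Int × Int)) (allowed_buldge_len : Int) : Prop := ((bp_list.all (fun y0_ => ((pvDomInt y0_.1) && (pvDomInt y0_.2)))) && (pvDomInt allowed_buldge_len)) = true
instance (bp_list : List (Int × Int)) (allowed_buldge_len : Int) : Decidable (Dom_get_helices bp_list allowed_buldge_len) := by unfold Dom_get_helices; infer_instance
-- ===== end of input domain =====

-- B replaces A's pop(0) loop with range-list membership tests by two staged passes: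
-- compute the cut indices between non-contiguous neighbours, then slice the list there
-- (objective: faster, asymptotic).


-- ===== PORT A =====
-- Port of A: the while-loop with pop(0) becomes structural recursion over bp_list carrying
-- (helices, current_helix); in-range lists are PySem.List.pyRange, membership is ∈.
def get_helices_loop (allowed_buldge_len : Int) (bp_list : List (Int × Int))
    (helices : List (List (Int × Int))) (current_helix : List (Int × Int)) :
    List (List (Int × Int)) :=
  match bp_list with
  | [] => helices ++ [current_helix]
  | current_bp :: rest =>
    match current_helix.getLast? with
    | none =>                                  -- current_helix == []
      get_helices_loop allowed_buldge_len rest helices (current_helix ++ [current_bp])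
    | some last =>
      let in_helix_left := PySem.List.pyRange (last.1 + 1) (last.1 + allowed_buldge_len + 2) 1
      let in_helix_right := PySem.List.pyRange (last.2 - allowed_buldge_len - 1) last.2 1
      if current_bp.1 ∈ in_helix_left ∧ current_bp.2 ∈ in_helix_right then
        get_helices_loop allowed_buldge_len rest helices (current_helix ++ [current_bp])
      else
        get_helices_loop allowed_buldge_len rest (helices ++ [current_helix]) [current_bp]

def get_helices (bp_list : List (Int × Int)) (allowed_buldge_len : Int) : List (List (Int × Int)) :=
  get_helices_loop allowed_buldge_len bp_list [] []

-- ===== PORT B =====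
-- Port of B: the contiguity test between adjacent pairs, as Source B's arithmetic condition
def pvOk (k : Int) (p q : Int × Int) : Bool :=
  decide (p.1 < q.1 ∧ q.1 ≤ p.1 + k + 1 ∧ p.2 - k - 1 ≤ q.2 ∧ q.2 < p.2)

-- pass 1: [i + 1 for i, (p, q) in enumerate(zip(bp_list, bp_list[1:])) if not ok]
def pvCuts (k : Int) (l : List (Int × Int)) : List Int :=
  ((PySem.List.enumerate (l.zip (PySem.List.slice l (some 1) none)) 0).filter
    (fun iq => !(pvOk k iq.2.1 iq.2.2))).map (fun iq => iq.1 + 1)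

-- pass 2: bounds = [0] + cuts + [len]; [bp_list[a:b] for a, b in zip(bounds, bounds[1:])]
def get_helices_alt (bp_list : List (Int × Int)) (allowed_buldge_len : Int) : List (List (Int × Int)) :=
  let bounds : List Int := 0 :: (pvCuts allowed_buldge_len bp_list ++ [(bp_list.length : Int)])
  (bounds.zip (PySem.List.slice bounds (some 1) none)).map
    (fun ab => PySem.List.slice bp_list (some ab.1) (some ab.2))

-- ===== PRECONDITION & SPEC =====
def Spec_get_helices (bp_list : List (Int × Int)) (allowed_buldge_len : Int) (out : List (List (Int × Int))) : Prop := out = get_helices_alt bp_list allowed_buldge_len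
instance (bp_list : List (Int × Int)) (allowed_buldge_len : Int) (out : List (List (Int × Int))) : Decidable (Spec_get_helices bp_list allowed_buldge_len out) := by unfold Spec_get_helices; infer_instance

-- ===== CLAIM (what is proved, stated in full; the proofs are below) =====
def Claim_equal_get_helices : Prop := ∀ (bp_list : List (Int × Int)) (allowed_buldge_len : Int), Dom_get_helices bp_list allowed_buldge_len → Spec_get_helices bp_list allowed_buldge_len (get_helices bp_list allowed_buldge_len)

-- ===== LEMMAS AND PROOFS =====

-- Common recursive characterisation: chP k prev bps = (rest of the chunk containing prev,
-- the chunks after it).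
def chP (k : Int) : (Int × Int) → List (Int × Int) → List (Int × Int) × List (List (Int × Int))
  | _, [] => ([], [])
  | prev, y :: ys =>
    let r := chP k y ys
    if pvOk k prev y then (y :: r.1, r.2) else ([], (y :: r.1) :: r.2)

-- A's loop computes chP
theorem loop_chP (k : Int) (bps : List (Int × Int)) :
    ∀ (prev : Int × Int) (cur : List (Int × Int)) (helices : List (List (Int × Int))),
    get_helices_loop k bps helices (cur ++ [prev]) =
      helices ++ ((cur ++ prev :: (chP k prev bps).1) :: (chP k prev bps).2) := by
  induction bps with
  | nil => intro prev cur helices; simp [get_helices_loop, chP]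
  | cons y ys ih =>
    intro prev cur helices
    rw [get_helices_loop]
    simp only [List.getLast?_concat]
    by_cases hok : pvOk k prev y = true
    · have hP : prev.1 < y.1 ∧ y.1 ≤ prev.1 + k + 1 ∧ prev.2 - k - 1 ≤ y.2 ∧ y.2 < prev.2 := by
        simpa [pvOk] using hok
      have hc : y.1 ∈ PySem.List.pyRange (prev.1 + 1) (prev.1 + k + 2) 1 ∧
          y.2 ∈ PySem.List.pyRange (prev.2 - k - 1) prev.2 1 := by
        rw [PySem.List.mem_pyRange_one, PySem.List.mem_pyRange_one]; omega
      rw [if_pos hc]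
      have : cur ++ [prev] ++ [y] = (cur ++ [prev]) ++ [y] := rfl
      rw [this, ih y (cur ++ [prev])]
      simp [chP, hok]
    · have hP : ¬ (prev.1 < y.1 ∧ y.1 ≤ prev.1 + k + 1 ∧ prev.2 - k - 1 ≤ y.2 ∧ y.2 < prev.2) := by
        simpa [pvOk] using hok
      have hc : ¬ (y.1 ∈ PySem.List.pyRange (prev.1 + 1) (prev.1 + k + 2) 1 ∧
          y.2 ∈ PySem.List.pyRange (prev.2 - k - 1) prev.2 1) := by
        rw [PySem.List.mem_pyRange_one, PySem.List.mem_pyRange_one]; omega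
      rw [if_neg hc]
      have : ([y] : List (Int × Int)) = [] ++ [y] := rfl
      rw [this, ih y []]
      simp [chP, hok]

theorem getA_cons (k : Int) (x : Int × Int) (xs : List (Int × Int)) :
    get_helices (x :: xs) k = (x :: (chP k x xs).1) :: (chP k x xs).2 := by
  have := loop_chP k xs x [] []
  simpa [get_helices, get_helices_loop] using this

-- shifting enumeration indices by one
theorem enumShift {β : Type} (p : β → Bool) (rest : List β) : ∀ s : Int,
    ((PySem.List.enumerate rest (s + 1)).filter (fun iq => p iq.2)).map (fun iq => iq.1 + 1)
      = (((PySem.List.enumerate rest s).filter (fun iq => p iq.2)).map (fun iq => iq.1 + 1)).map (· + 1) := by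
  induction rest with
  | nil => intro s; simp [PySem.List.enumerate_nil]
  | cons b bs ih =>
    intro s
    rw [PySem.List.enumerate_cons, PySem.List.enumerate_cons]
    simp only [List.filter_cons]
    by_cases hb : p b
    · simp only [hb, if_pos, List.map_cons]
      refine congrArg₂ List.cons (by ring) ?_
      exact ih (s + 1)
    · simp only [hb, Bool.false_eq_true, reduceIte]
      exact ih (s + 1)

theorem cuts_cons (k : Int) (x y : Int × Int) (ys : List (Int × Int)) :
    pvCuts k (x :: y :: ys)
      = (if pvOk k x y then [] else [1]) ++ (pvCuts k (y :: ys)).map (· + 1) := by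
  unfold pvCuts
  rw [PySem.List.slice_from_one, PySem.List.slice_from_one]
  simp only [List.tail_cons, List.zip_cons_cons, PySem.List.enumerate_cons, List.filter_cons]
  by_cases hok : pvOk k x y
  · simp only [hok, Bool.not_true]
    simp only [Bool.false_eq_true, reduceIte, List.nil_append]
    exact enumShift (fun q => !pvOk k q.1 q.2) ((y :: ys).zip ys) 0
  · rw [Bool.not_eq_true] at hok
    simp only [hok, Bool.not_false, if_pos, List.map_cons]
    rw [enumShift (fun q => !pvOk k q.1 q.2) ((y :: ys).zip ys) 0]
    simp

theorem cuts_nonneg (k : Int) (l : List (Int × Int)) : ∀ c ∈ pvCuts k l, 0 ≤ c := by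
  intro c hc
  unfold pvCuts at hc
  simp only [List.mem_map, List.mem_filter] at hc
  obtain ⟨iq, ⟨hmem, _⟩, rfl⟩ := hc
  rw [PySem.List.mem_enumerate_iff] at hmem
  obtain ⟨j, hj, rfl⟩ := hmem
  simp; omega

-- pass 2 as a named map
def pSl (l : List (Int × Int)) (bs : List Int) : List (List (Int × Int)) :=
  (bs.zip (bs.drop 1)).map (fun ab => PySem.List.slice l (some ab.1) (some ab.2))

theorem alt_eq_pSl (l : List (Int × Int)) (k : Int) :
    get_helices_alt l k = pSl l (0 :: (pvCuts k l ++ [(l.length : Int)])) := by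
  simp [get_helices_alt, pSl, PySem.List.slice_from_one]

theorem slice_cons_shift (x : Int × Int) (xs : List (Int × Int)) (a b : Int)
    (ha : 0 ≤ a) (hb : 0 ≤ b) :
    PySem.List.slice (x :: xs) (some (a + 1)) (some (b + 1)) = PySem.List.slice xs (some a) (some b) := by
  rw [PySem.List.slice_toNat _ (by omega) (by omega), PySem.List.slice_toNat _ ha hb]
  have h1 : (a + 1).toNat = a.toNat + 1 := by omega
  have h2 : (b + 1).toNat = b.toNat + 1 := by omega
  rw [h1, h2]
  simp [Nat.succ_sub_succ]

theorem slice_cons_head (x : Int × Int) (xs : List (Int × Int)) (b : Int) (hb : 0 ≤ b) :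
    PySem.List.slice (x :: xs) (some 0) (some (b + 1)) = x :: PySem.List.slice xs (some 0) (some b) := by
  rw [PySem.List.slice_toNat _ (by omega) (by omega), PySem.List.slice_toNat _ (by omega) hb]
  have h2 : (b + 1).toNat = b.toNat + 1 := by omega
  simp [h2]

theorem pSl_shift (x : Int × Int) (xs : List (Int × Int)) :
    ∀ (bs : List Int) (a : Int), 0 ≤ a → (∀ b ∈ bs, 0 ≤ b) →
    pSl (x :: xs) ((a + 1) :: bs.map (· + 1)) = pSl xs (a :: bs) := by
  intro bs
  induction bs with
  | nil => intro a _ _; simp [pSl]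
  | cons b bs' ih =>
    intro a ha hall
    have hb : 0 ≤ b := hall b (by simp)
    have hbs' : ∀ c ∈ bs', 0 ≤ c := fun c hc => hall c (by simp [hc])
    simp only [List.map_cons, pSl, List.drop_succ_cons, List.drop_zero, List.zip_cons_cons,
      List.map_cons] at *
    refine congrArg₂ _ (slice_cons_shift x xs a b ha hb) ?_
    have := ih b hb hbs'
    simpa [pSl] using this

theorem pSl_cons_zero (l : List (Int × Int)) (b : Int) (bs : List Int) :
    pSl l (0 :: b :: bs) = PySem.List.slice l (some 0) (some b) :: pSl l (b :: bs) := by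
  simp [pSl]

theorem alt_cons (k : Int) (x : Int × Int) (xs : List (Int × Int)) :
    get_helices_alt (x :: xs) k = (x :: (chP k x xs).1) :: (chP k x xs).2 := by
  induction xs generalizing x with
  | nil =>
    simp [get_helices_alt, pvCuts, PySem.List.slice_from_one, PySem.List.enumerate_nil, chP,
      PySem.List.slice_toNat]
  | cons y ys ih =>
    rw [alt_eq_pSl, cuts_cons]
    have hlen : ((x :: y :: ys).length : Int) = ((y :: ys).length : Int) + 1 := by
      simp
    set C := pvCuts k (y :: ys) with hCdef
    set L : Int := ((y :: ys).length : Int) with hLdef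
    have hCL : ∀ c ∈ C ++ [L], 0 ≤ c := by
      intro c hc
      rcases List.mem_append.mp hc with h | h
      · exact cuts_nonneg k _ c h
      · simp at h; subst h; positivity
    obtain ⟨b, B', hC⟩ : ∃ b B', C ++ [L] = b :: B' := by
      cases C with
      | nil => exact ⟨L, [], rfl⟩
      | cons c cs => exact ⟨c, cs ++ [L], rfl⟩
    have hb : 0 ≤ b := hCL b (by rw [hC]; simp)
    have hB' : ∀ c ∈ B', 0 ≤ c := fun c hc => hCL c (by rw [hC]; simp [hc])
    have hmap : (if pvOk k x y then ([] : List Int) else [1]) ++ C.map (· + 1) ++ [((x :: y :: ys).length : Int)]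
        = (if pvOk k x y then ([] : List Int) else [0 + 1]) ++ ((b + 1) :: B'.map (· + 1)) := by
      have : C.map (· + 1) ++ [((x :: y :: ys).length : Int)] = (C ++ [L]).map (· + 1) := by
        rw [List.map_append, hlen]; simp
      rw [List.append_assoc, this, hC]
      simp
    rw [hmap]
    have ihy : pSl (y :: ys) (0 :: (b :: B')) = (y :: (chP k y ys).1) :: (chP k y ys).2 := by
      have := ih y
      rw [alt_eq_pSl, ← hCdef, ← hLdef, hC] at this
      exact this
    by_cases hok : pvOk k x y
    · rw [if_pos hok]
      simp only [List.nil_append]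
      rw [pSl_cons_zero (x :: y :: ys) (b + 1) (B'.map (· + 1))]
      rw [pSl_cons_zero (y :: ys) b B'] at ihy
      have h1 : PySem.List.slice (y :: ys) (some 0) (some b) = y :: (chP k y ys).1 :=
        (List.cons_eq_cons.mp ihy).1
      have h2 : pSl (y :: ys) (b :: B') = (chP k y ys).2 :=
        (List.cons_eq_cons.mp ihy).2
      rw [slice_cons_head _ _ b hb, h1, pSl_shift x (y :: ys) B' b hb hB', h2]
      simp [chP, hok]
    · rw [if_neg hok]
      simp only [List.singleton_append]
      rw [show ((b + 1) :: B'.map (· + 1)) = (b :: B').map (· + 1) from rfl]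
      have hbB' : ∀ c ∈ b :: B', 0 ≤ c := by
        intro c hc
        rcases List.mem_cons.mp hc with h | h
        · subst h; exact hb
        · exact hB' c h
      rw [pSl_cons_zero, pSl_shift x (y :: ys) (b :: B') 0 le_rfl hbB', ihy]
      have hx : PySem.List.slice (x :: y :: ys) (some 0) (some (0 + 1)) = [x] := by
        rw [PySem.List.slice_toNat _ le_rfl (by omega)]; rfl
      rw [hx]
      simp [chP, hok]

-- ===== VERDICT (by name: the statement is the Claim_ definition above) =====
theorem get_helices_spec : Claim_equal_get_helices := by
  intro bp_list k _
  unfold Spec_get_helices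
  cases bp_list with
  | nil =>
    simp [get_helices, get_helices_loop, get_helices_alt, pvCuts,
      PySem.List.slice_from_one, PySem.List.enumerate_nil, PySem.List.slice_toNat]
  | cons x xs =>
    rw [getA_cons, alt_cons]
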